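-- pv_equiv track=rewrite | github.com/jrengmusic/end | gen/gen_char_props.py | splitbins
-- ===== SOURCE A (Python) =====
-- def splitbins(values: list[int], shift: int) -> tuple[list[int], list[int], list[int]]:
--     """Build a 3-level multistage table.
--
--     t1[cp >> shift] → block_index
--     t2[(block_index << shift) + (cp & mask)] → t3_index
--     t3[t3_index] → value
--
--     Returns (t1, t2, t3).
--     """
--     mask = (1 << shift) - 1
--     block_size = 1 << shift
--
--     # Split values into blocks of block_size
--     n = len(values)
--     # Pad to multiple of block_size
--     padded = list(values)
--     while len(padded) % block_size != 0:
--         padded.append(0)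
--
--     num_blocks = len(padded) // block_size
--
--     # Deduplicate blocks → t2 (flat) + t1 (block index per input block)
--     block_map: dict[tuple[int, ...], int] = {}
--     t2_flat: list[int] = []
--     t1: list[int] = []
--
--     for b in range(num_blocks):
--         block = tuple(padded[b * block_size : (b + 1) * block_size])
--         if block not in block_map:
--             idx = len(t2_flat) >> shift  # index of this block in t2
--             block_map[block] = idx
--             t2_flat.extend(block)
--         t1.append(block_map[block])
--
--     # t2_flat contains indices into t3 (after deduplication of values)
--     # Deduplicate values → t3
--     val_map: dict[int, int] = {}
--     t3: list[int] = []
--     t2: list[int] = []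
--
--     for v in t2_flat:
--         if v not in val_map:
--             val_map[v] = len(t3)
--             t3.append(v)
--         t2.append(val_map[v])
--
--     return t1, t2, t3
-- ===== SOURCE B (Python) =====
-- def splitbins(values: list[int], shift: int) -> tuple[list[int], list[int], list[int]]:
--     """Build the same 3-level multistage table, deduplicating values first.
--
--     Pass 1 assigns every distinct value its t3 index in first-appearance
--     order over the whole padded array; pass 2 deduplicates blocks of those
--     indices, so no separate value-dedup pass over t2 is needed.
--     """
--     block_size = 1 << shift
--     pad = -len(values) % block_size
--     padded = list(values)
--     for _ in range(pad):
--         padded.append(0)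
--
--     # Pass 1: deduplicate values over the whole padded array -> t3 + index array
--     val_map: dict[int, int] = {}
--     t3: list[int] = []
--     idx: list[int] = []
--     for v in padded:
--         j = val_map.get(v)
--         if j is None:
--             j = len(t3)
--             val_map[v] = j
--             t3.append(v)
--         idx.append(j)
--
--     # Pass 2: deduplicate blocks of t3-indices -> t1 + flat t2
--     block_map: dict[tuple[int, ...], int] = {}
--     t1: list[int] = []
--     t2: list[int] = []
--     rest = idx
--     while rest:
--         blk = tuple(rest[:block_size])
--         rest = rest[block_size:]
--         j = block_map.get(blk)
--         if j is None:
--             j = len(block_map)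
--             block_map[blk] = j
--             t2.extend(blk)
--         t1.append(j)
--     return t1, t2, t3
-- ===== Notes on version B (the rewrite author's own statement) =====
-- stated objective: alternative
-- what changed: B swaps the two deduplication phases: it first deduplicates values over the whole padded array (building t3 and a t3-index array in one pass), then deduplicates blocks of t3-indices with a single dict while walking the index array by slicing, instead of A's block-dedup index loop followed by a value-dedup pass over t2_flat.
import Mathlib
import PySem

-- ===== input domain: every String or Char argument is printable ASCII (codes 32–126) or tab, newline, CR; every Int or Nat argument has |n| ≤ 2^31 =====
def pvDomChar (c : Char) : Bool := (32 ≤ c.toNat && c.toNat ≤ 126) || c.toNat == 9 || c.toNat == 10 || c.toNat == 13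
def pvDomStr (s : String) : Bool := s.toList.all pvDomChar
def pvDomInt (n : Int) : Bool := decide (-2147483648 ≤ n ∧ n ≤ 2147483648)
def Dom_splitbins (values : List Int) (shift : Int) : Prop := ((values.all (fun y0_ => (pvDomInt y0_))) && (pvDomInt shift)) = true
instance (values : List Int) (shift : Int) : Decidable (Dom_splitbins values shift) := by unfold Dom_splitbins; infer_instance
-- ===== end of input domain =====

-- B swaps the two deduplication phases (values first, then blocks of t3-indices), one pass each; same results, similar cost (objective: alternative).

-- ===== PORT A =====

-- A's padding while-loop: append 0 until length is a multiple of 2^s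
def padA (s : Nat) (p : List Int) : List Int :=
  if h : p.length % 2 ^ s = 0 then p else padA s (p ++ [0])
termination_by (2 ^ s - p.length % 2 ^ s) % 2 ^ s
decreasing_by
  have hbs : 0 < 2 ^ s := Nat.two_pow_pos s
  have h1 : p.length % 2 ^ s < 2 ^ s := Nat.mod_lt _ hbs
  have hm2 : 2 ≤ 2 ^ s := by
    cases s with
    | zero => exact absurd (Nat.mod_one _) (by simpa using h)
    | succ t =>
      have := Nat.one_lt_two_pow_iff.mpr (Nat.succ_ne_zero t)
      omega
  have e0 : (p ++ [0]).length = p.length + 1 := by simp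
  rw [e0]
  have e2 : (p.length + 1) % 2 ^ s = (p.length % 2 ^ s + 1 % 2 ^ s) % 2 ^ s := Nat.add_mod _ _ _
  rw [Nat.mod_eq_of_lt hm2] at e2
  have e3 : (2 ^ s : Nat) % 2 ^ s = 0 := Nat.mod_self _
  have e6 : (2 ^ s - p.length % 2 ^ s) % 2 ^ s = 2 ^ s - p.length % 2 ^ s :=
    Nat.mod_eq_of_lt (by omega)
  by_cases hc : p.length % 2 ^ s + 1 = 2 ^ s
  · have e4 : (p.length + 1) % 2 ^ s = 0 := by rw [e2, hc]; exact e3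
    rw [e4]
    simp only [Nat.sub_zero]
    rw [e3, e6]
    omega
  · have e4 : (p.length + 1) % 2 ^ s = p.length % 2 ^ s + 1 := by
      rw [e2]; exact Nat.mod_eq_of_lt (by omega)
    rw [e4]
    have e7 : (2 ^ s - (p.length % 2 ^ s + 1)) % 2 ^ s = 2 ^ s - (p.length % 2 ^ s + 1) :=
      Nat.mod_eq_of_lt (by omega)
    rw [e7, e6]
    omega

def splitbins (values : List Int) (shift : Int) : List Int × List Int × List Int :=
  if shift < 0 then ([], [], []) else  -- 1 << shift raises ValueError for shift < 0 (outside Pre_)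
  let s := shift.toNat
  let bs : Nat := 2 ^ s
  let padded := padA s values
  let numBlocks : Nat := padded.length / bs
  -- for b in range(num_blocks): dedup blocks → block_map, t2_flat, t1
  let r1 := (PySem.List.pyRange 0 (numBlocks : Int) 1).foldl
    (fun (st : PySem.Dict (List Int) Int × List Int × List Int) b =>
      let block := PySem.List.slice padded (some (b * (bs : Int))) (some ((b + 1) * (bs : Int)))
      let st' := if st.1.contains block then st
                 else (st.1.insert block ((st.2.1.length >>> s : Nat) : Int), st.2.1 ++ block, st.2.2)
      (st'.1, st'.2.1, st'.2.2 ++ [st'.1.getD block 0]))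
    (PySem.Dict.empty, [], [])
  let t1 := r1.2.2
  let t2f := r1.2.1
  -- for v in t2_flat: dedup values → val_map, t3, t2
  let r2 := t2f.foldl
    (fun (st : PySem.Dict Int Int × List Int × List Int) v =>
      let st' := if st.1.contains v then st
                 else (st.1.insert v ((st.2.1.length : Nat) : Int), st.2.1 ++ [v], st.2.2)
      (st'.1, st'.2.1, st'.2.2 ++ [st'.1.getD v 0]))
    (PySem.Dict.empty, [], [])
  (t1, r2.2.2, r2.2.1)

-- ===== PORT B =====

-- B's pass 2: while rest: blk = rest[:bs]; rest = rest[bs:]; dedup index-blocks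
def altBlocks (s : Nat) (rest : List Int)
    (st : PySem.Dict (List Int) Int × List Int × List Int) :
    PySem.Dict (List Int) Int × List Int × List Int :=
  match rest with
  | [] => st
  | v :: vs =>
    let blk := (v :: vs).take (2 ^ s)
    let rest' := (v :: vs).drop (2 ^ s)
    let st' :=
      match st.1.get? blk with
      | some j => (st.1, st.2.1 ++ [j], st.2.2)
      | none => (st.1.insert blk ((st.1.size : Nat) : Int), st.2.1 ++ [((st.1.size : Nat) : Int)], st.2.2 ++ blk)
    altBlocks s rest' st'
termination_by rest.length
decreasing_by
  simp only [List.length_drop, List.length_cons]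
  have := Nat.two_pow_pos s
  omega

def splitbins_alt (values : List Int) (shift : Int) : List Int × List Int × List Int :=
  if shift < 0 then ([], [], []) else
  let s := shift.toNat
  let bs : Nat := 2 ^ s
  let pad := (PySem.Int.mod (-(values.length : Int)) ((bs : Nat) : Int)).toNat
  let padded := (List.range pad).foldl (fun acc _ => acc ++ [0]) values
  -- pass 1: for v in padded: dedup values → val_map, t3, idx
  let p1 := padded.foldl
    (fun (st : PySem.Dict Int Int × List Int × List Int) v =>
      match st.1.get? v with
      | some j => (st.1, st.2.1, st.2.2 ++ [j])
      | none => (st.1.insert v ((st.2.1.length : Nat) : Int), st.2.1 ++ [v], st.2.2 ++ [((st.2.1.length : Nat) : Int)]))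
    (PySem.Dict.empty, [], [])
  -- pass 2: dedup blocks of t3-indices → block_map, t1, t2
  let p2 := altBlocks s p1.2.2 (PySem.Dict.empty, [], [])
  (p2.2.1, p2.2.2, p1.2.1)

-- ===== PRECONDITION & SPEC =====
-- Pre_ excludes shift < 0, on which Python's '1 << shift' raises ValueError.
def Pre_splitbins (values : List Int) (shift : Int) : Prop := 0 ≤ shift
instance (values : List Int) (shift : Int) : Decidable (Pre_splitbins values shift) := by unfold Pre_splitbins; infer_instance
def pvWitness_splitbins : List Int × Int := ([7, 7, 0, 1], 1)

def Spec_splitbins (values : List Int) (shift : Int) (out : List Int × List Int × List Int) : Prop := out = splitbins_alt values shift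
instance (values : List Int) (shift : Int) (out : List Int × List Int × List Int) : Decidable (Spec_splitbins values shift out) := by unfold Spec_splitbins; infer_instance

-- ===== CLAIM (what is proved, stated in full; the proofs are below) =====
def Claim_equal_splitbins : Prop := ∀ (values : List Int) (shift : Int), Dom_splitbins values shift → Pre_splitbins values shift → Spec_splitbins values shift (splitbins values shift)

-- ===== LEMMAS AND PROOFS =====

-- ---------- generic first-occurrence dedup relative to a "seen" list ----------
def dd {α : Type} [DecidableEq α] (seen : List α) : List α → List α
  | [] => []
  | v :: l => if v ∈ seen then dd seen l else v :: dd (seen ++ [v]) l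

theorem dd_congr {α : Type} [DecidableEq α] (l : List α) (s₁ s₂ : List α)
    (h : ∀ a, a ∈ s₁ ↔ a ∈ s₂) : dd s₁ l = dd s₂ l := by
  induction l generalizing s₁ s₂ with
  | nil => rfl
  | cons v l ih =>
    simp only [dd]
    by_cases hv : v ∈ s₁
    · rw [if_pos hv, if_pos ((h v).mp hv), ih _ _ h]
    · rw [if_neg hv, if_neg (fun hc => hv ((h v).mpr hc))]
      congr 1
      exact ih _ _ (by intro a; simp [h a])

theorem mem_dd {α : Type} [DecidableEq α] (a : α) (l seen : List α) :
    a ∈ dd seen l ↔ a ∈ l ∧ a ∉ seen := by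
  induction l generalizing seen with
  | nil => simp [dd]
  | cons v l ih =>
    simp only [dd]
    by_cases hv : v ∈ seen
    · rw [if_pos hv, ih]
      simp only [List.mem_cons]
      constructor
      · rintro ⟨h1, h2⟩; exact ⟨Or.inr h1, h2⟩
      · rintro ⟨rfl | h1, h2⟩
        · exact absurd hv h2
        · exact ⟨h1, h2⟩
    · rw [if_neg hv]
      simp only [List.mem_cons, ih, List.mem_append, List.mem_singleton]
      constructor
      · rintro (rfl | ⟨h1, h2⟩)
        · exact ⟨Or.inl rfl, hv⟩
        · exact ⟨Or.inr h1, fun hc => h2 (Or.inl hc)⟩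
      · rintro ⟨rfl | h1, h2⟩
        · exact Or.inl rfl
        · by_cases hav : a = v
          · exact Or.inl hav
          · refine Or.inr ⟨h1, ?_⟩
            rintro (hc | hc | hc)
            · exact h2 hc
            · exact hav hc
            · exact List.not_mem_nil hc

theorem dd_append {α : Type} [DecidableEq α] (x y seen : List α) :
    dd seen (x ++ y) = dd seen x ++ dd (x ++ seen) y := by
  induction x generalizing seen with
  | nil => simp [dd]
  | cons v x ih =>
    simp only [List.cons_append, dd]
    by_cases hv : v ∈ seen
    · rw [if_pos hv, if_pos hv, ih]
      congr 1
      refine dd_congr _ _ _ (fun a => ?_)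
      simp only [List.cons_append, List.mem_cons, List.mem_append]
      constructor
      · tauto
      · rintro (rfl | h | h)
        · exact Or.inr hv
        · exact Or.inl h
        · exact Or.inr h
    · rw [if_neg hv, if_neg hv, ih]
      simp only [List.cons_append]
      congr 2
      refine dd_congr _ _ _ (fun a => ?_)
      simp only [List.mem_append, List.mem_cons, List.mem_singleton]
      tauto

theorem dd_eq_nil {α : Type} [DecidableEq α] (l seen : List α) (h : ∀ a ∈ l, a ∈ seen) :
    dd seen l = [] := by
  cases hd : dd seen l with
  | nil => rfl
  | cons a t =>
    have : a ∈ dd seen l := by rw [hd]; exact List.mem_cons_self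
    rw [mem_dd] at this
    exact absurd (h a this.1) this.2

-- duplicate blocks reveal no new values: dedup of the flattened deduped blocks
theorem dd_main {α : Type} [DecidableEq α] (bls seenB : List (List α)) (seenV : List α)
    (h : ∀ v, v ∈ seenV ↔ ∃ b ∈ seenB, v ∈ b) :
    dd seenV (dd seenB bls).flatten = dd seenV bls.flatten := by
  induction bls generalizing seenB seenV with
  | nil => rfl
  | cons b bls ih =>
    simp only [dd, List.flatten_cons]
    by_cases hb : b ∈ seenB
    · rw [if_pos hb, dd_append]
      have h1 : dd seenV b = [] := dd_eq_nil _ _ (fun a ha => (h a).mpr ⟨b, hb, ha⟩)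
      have h2 : dd (b ++ seenV) bls.flatten = dd seenV bls.flatten := by
        refine dd_congr _ _ _ (fun a => ?_)
        simp only [List.mem_append]
        constructor
        · rintro (ha | ha)
          · exact (h a).mpr ⟨b, hb, ha⟩
          · exact ha
        · exact Or.inr
      rw [h1, List.nil_append, h2]
      exact ih seenB seenV h
    · rw [if_neg hb, List.flatten_cons, dd_append, dd_append]
      congr 1
      refine ih (seenB ++ [b]) (b ++ seenV) (fun v => ?_)
      simp only [List.mem_append, List.mem_singleton, h v]
      constructor
      · rintro (hv | hv)
        · exact ⟨b, by simp, hv⟩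
        · obtain ⟨c, hc, hvc⟩ := hv
          exact ⟨c, by simp [hc], hvc⟩
      · rintro ⟨c, hc, hvc⟩
        rcases hc with hc | rfl
        · exact Or.inr ⟨c, hc, hvc⟩
        · exact Or.inl hvc

-- ---------- chunking ----------
def chunks (s : Nat) : List Int → List (List Int)
  | [] => []
  | v :: vs => (v :: vs).take (2 ^ s) :: chunks s ((v :: vs).drop (2 ^ s))
termination_by l => l.length
decreasing_by
  simp only [List.length_drop, List.length_cons]
  have := Nat.two_pow_pos s
  omega

theorem flatten_chunks (s : Nat) (l : List Int) : (chunks s l).flatten = l := by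
  fun_induction chunks s l with
  | case1 => rfl
  | case2 v vs ih =>
    simp only [List.flatten_cons, ih, List.take_append_drop]

theorem chunks_map (s : Nat) (f : Int → Int) (l : List Int) :
    chunks s (l.map f) = (chunks s l).map (List.map f) := by
  fun_induction chunks s l with
  | case1 => simp [chunks]
  | case2 v vs ih =>
    have e2 : chunks s (List.map f (v :: vs)) =
        (List.map f (v :: vs)).take (2 ^ s) :: chunks s ((List.map f (v :: vs)).drop (2 ^ s)) := by
      rw [show List.map f (v :: vs) = f v :: List.map f vs from rfl, chunks]
    rw [e2, List.map_cons]
    congr 1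
    · rw [show (f v :: List.map f vs) = List.map f (v :: vs) from rfl, List.map_take]
    · rw [show (f v :: List.map f vs) = List.map f (v :: vs) from rfl,
          show (List.map f (v :: vs)).drop (2 ^ s) = List.map f ((v :: vs).drop (2 ^ s))
            from List.map_drop.symm]
      exact ih

theorem chunks_length (s : Nat) (l : List Int) (h : 2 ^ s ∣ l.length) :
    ∀ c ∈ chunks s l, c.length = 2 ^ s := by
  fun_induction chunks s l with
  | case1 => intro c hc; simp at hc
  | case2 v vs ih =>
    intro c hc
    have hbs := Nat.two_pow_pos s
    obtain ⟨q, hq⟩ := h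
    rw [List.length_cons] at hq
    have hq1 : 1 ≤ q := by
      rcases Nat.eq_zero_or_pos q with rfl | h'
      · simp at hq
      · exact h'
    have hle : 2 ^ s * 1 ≤ 2 ^ s * q := Nat.mul_le_mul_left _ hq1
    have hone : 2 ^ s * 1 = 2 ^ s := Nat.mul_one _
    rcases List.mem_cons.mp hc with rfl | hc
    · simp only [List.length_take, List.length_cons]
      omega
    · have h4 : 2 ^ s * q = 2 ^ s * (q - 1) + 2 ^ s := by
        cases q with
        | zero => omega
        | succ t => simp [Nat.succ_sub_one, Nat.mul_succ]
      refine ih ⟨q - 1, ?_⟩ c hc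
      simp only [List.length_drop, List.length_cons]
      omega

theorem mem_of_mem_chunks (s : Nat) (l c : List Int) (hc : c ∈ chunks s l) :
    ∀ v ∈ c, v ∈ l := by
  intro v hv
  rw [← flatten_chunks s l]
  exact List.mem_flatten.mpr ⟨c, hc, hv⟩

-- ---------- the padding ----------
theorem pad_count_succ (m n : Nat) (hm : 0 < m) (hr : n % m ≠ 0) :
    (m - (n + 1) % m) % m + 1 = (m - n % m) % m := by
  have hm2 : 2 ≤ m := by
    rcases Nat.lt_or_ge m 2 with h | h
    · exfalso
      have h1 : m = 1 := by omega
      rw [h1, Nat.mod_one] at hr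
      exact hr rfl
    · exact h
  have hrm : n % m < m := Nat.mod_lt _ hm
  have e : (n + 1) % m = (n % m + 1 % m) % m := Nat.add_mod _ _ _
  rw [Nat.mod_eq_of_lt hm2] at e
  have h1 : (m - n % m) % m = m - n % m := Nat.mod_eq_of_lt (by omega)
  by_cases hc : n % m + 1 = m
  · have h2 : (n + 1) % m = 0 := by rw [e, hc, Nat.mod_self]
    rw [h2, h1, Nat.sub_zero, Nat.mod_self]
    omega
  · have h2 : (n + 1) % m = n % m + 1 := by rw [e]; exact Nat.mod_eq_of_lt (by omega)
    rw [h2, h1, Nat.mod_eq_of_lt (by omega)]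
    omega

theorem padA_eq (s : Nat) (p : List Int) :
    padA s p = p ++ List.replicate ((2 ^ s - p.length % 2 ^ s) % 2 ^ s) 0 := by
  fun_induction padA s p with
  | case1 p h =>
    rw [h, Nat.sub_zero, Nat.mod_self]
    simp
  | case2 p h ih =>
    rw [ih]
    simp only [List.length_append, List.length_cons, List.length_nil, Nat.zero_add]
    rw [← pad_count_succ (2 ^ s) p.length (Nat.two_pow_pos s) h]
    rw [List.append_assoc, List.replicate_succ]
    rfl

theorem pad_alt_eq (s n : Nat) :
    (PySem.Int.mod (-(n : Int)) ((2 ^ s : Nat) : Int)).toNat = (2 ^ s - n % 2 ^ s) % 2 ^ s := by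
  have hm : 0 < 2 ^ s := Nat.two_pow_pos s
  have hmod : PySem.Int.mod (-(n : Int)) ((2 ^ s : Nat) : Int)
      = (-(n : Int)) % ((2 ^ s : Nat) : Int) := by
    show (-(n : Int)).fmod _ = _
    rw [Int.fmod_eq_emod]
    rw [if_pos (Or.inl (by positivity))]
    ring
  rw [hmod]
  have hdm := Nat.div_add_mod n (2 ^ s)
  have hrm : n % 2 ^ s < 2 ^ s := Nat.mod_lt _ hm
  by_cases hr : n % 2 ^ s = 0
  · have hnn : 2 ^ s * (n / 2 ^ s) = n := by omega
    have hn : ((2 ^ s : Nat) : Int) * ((n / 2 ^ s : Nat) : Int) = (n : Int) := by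
      rw [← Nat.cast_mul, hnn]
    have h1 : -(n : Int) = 0 + ((2 ^ s : Nat) : Int) * (-((n / 2 ^ s : Nat) : Int)) := by
      rw [zero_add, mul_neg, hn]
    rw [h1, Int.add_mul_emod_self_left]
    rw [hr, Nat.sub_zero, Nat.mod_self]
    rfl
  · have hK : (2 ^ s - n % 2 ^ s) % 2 ^ s = 2 ^ s - n % 2 ^ s := Nat.mod_eq_of_lt (by omega)
    have hle : n % 2 ^ s ≤ 2 ^ s := le_of_lt hrm
    have hcast : ((2 ^ s - n % 2 ^ s : Nat) : Int)
        = ((2 ^ s : Nat) : Int) - ((n % 2 ^ s : Nat) : Int) := by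
      exact Nat.cast_sub hle
    have hn : ((2 ^ s : Nat) : Int) * ((n / 2 ^ s : Nat) : Int) + ((n % 2 ^ s : Nat) : Int)
        = (n : Int) := by
      rw [← Nat.cast_mul, ← Nat.cast_add, hdm]
    have h1 : -(n : Int) = ((2 ^ s - n % 2 ^ s : Nat) : Int) +
        ((2 ^ s : Nat) : Int) * (-((n / 2 ^ s : Nat) : Int) - 1) := by
      rw [hcast]
      linear_combination hn
    rw [h1, Int.add_mul_emod_self_left, Int.emod_eq_of_lt (by positivity)
      (by exact_mod_cast (by omega : (2 ^ s - n % 2 ^ s) < 2 ^ s))]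
    rw [hK]
    exact Int.toNat_natCast _

-- the append-0 padding loop builds 'values ++ replicate pad 0'
theorem pad_foldl_eq (acc : List Int) (n : Nat) :
    (List.range n).foldl (fun acc _ => acc ++ [0]) acc = acc ++ List.replicate n 0 := by
  induction n with
  | zero => simp
  | succ n ih =>
    rw [List.range_succ, List.foldl_append, ih, List.foldl_cons, List.foldl_nil,
      List.replicate_succ']
    simp

-- ---------- named loop bodies ----------
def fT (T : List Int) (v : Int) : Int := ((T.idxOf v : Nat) : Int)

def bodyV (st : PySem.Dict Int Int × List Int × List Int) (v : Int) :
    PySem.Dict Int Int × List Int × List Int :=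
  match st.1.get? v with
  | some j => (st.1, st.2.1, st.2.2 ++ [j])
  | none => (st.1.insert v ((st.2.1.length : Nat) : Int), st.2.1 ++ [v], st.2.2 ++ [((st.2.1.length : Nat) : Int)])

def bodyAc (s : Nat) (st : PySem.Dict (List Int) Int × List Int × List Int) (c : List Int) :
    PySem.Dict (List Int) Int × List Int × List Int :=
  let st' := if st.1.contains c then st
             else (st.1.insert c ((st.2.1.length >>> s : Nat) : Int), st.2.1 ++ c, st.2.2)
  (st'.1, st'.2.1, st'.2.2 ++ [st'.1.getD c 0])

def bodyBc (st : PySem.Dict (List Int) Int × List Int × List Int) (c : List Int) :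
    PySem.Dict (List Int) Int × List Int × List Int :=
  match st.1.get? c with
  | some j => (st.1, st.2.1 ++ [j], st.2.2)
  | none => (st.1.insert c ((st.1.size : Nat) : Int), st.2.1 ++ [((st.1.size : Nat) : Int)], st.2.2 ++ c)

-- ---------- the value-dedup loop (A's second loop = B's first pass, same body) ----------
theorem val_body_eq :
    (fun (st : PySem.Dict Int Int × List Int × List Int) v =>
      let st' := if st.1.contains v then st
                 else (st.1.insert v ((st.2.1.length : Nat) : Int), st.2.1 ++ [v], st.2.2)
      (st'.1, st'.2.1, st'.2.2 ++ [st'.1.getD v 0])) = bodyV := by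
  funext st v
  unfold bodyV
  cases hg : st.1.get? v with
  | some j =>
    have hc : st.1.contains v = true := by rw [PySem.Dict.contains_eq_isSome_get?, hg]; rfl
    simp only [hc, if_true]
    rw [PySem.Dict.getD_of_get?_eq_some _ _ hg]
  | none =>
    have hc : st.1.contains v = false := by rw [PySem.Dict.contains_eq_isSome_get?, hg]; rfl
    simp only [hc, Bool.false_eq_true, if_false]
    rw [PySem.Dict.getD_insert_self]

theorem val_loop (l : List Int) (vm : PySem.Dict Int Int) (t3 out : List Int)
    (hnd : t3.Nodup)
    (hvm : ∀ v : Int, vm.get? v = if v ∈ t3 then some (fT t3 v) else none) :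
    (l.foldl bodyV (vm, t3, out)).2.1 = t3 ++ dd t3 l ∧
    (l.foldl bodyV (vm, t3, out)).2.2 = out ++ l.map (fT (t3 ++ dd t3 l)) := by
  induction l generalizing vm t3 out with
  | nil => exact ⟨by simp [dd], by simp [dd]⟩
  | cons v l ih =>
    by_cases hv : v ∈ t3
    · have hb : bodyV (vm, t3, out) v = (vm, t3, out ++ [fT t3 v]) := by
        unfold bodyV
        rw [hvm v, if_pos hv]
      have hdd : dd t3 (v :: l) = dd t3 l := by simp [dd, hv]
      obtain ⟨ih1, ih2⟩ := ih vm t3 (out ++ [fT t3 v]) hnd hvm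
      constructor
      · rw [List.foldl_cons, hb, ih1, hdd]
      · rw [List.foldl_cons, hb, ih2, hdd, List.map_cons]
        rw [show fT (t3 ++ dd t3 l) v = fT t3 v from by
          unfold fT; rw [List.idxOf_append_of_mem hv]]
        simp
    · have hb : bodyV (vm, t3, out) v =
          (vm.insert v ((t3.length : Nat) : Int), t3 ++ [v], out ++ [((t3.length : Nat) : Int)]) := by
        unfold bodyV
        rw [hvm v, if_neg hv]
      have hd : t3.Disjoint [v] := by
        intro a ha hb'
        simp only [List.mem_singleton] at hb'
        subst hb'
        exact hv ha
      have hnd' : (t3 ++ [v]).Nodup := hnd.append (List.nodup_singleton v) hd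
      have hvm' : ∀ w : Int, (vm.insert v ((t3.length : Nat) : Int)).get? w =
          if w ∈ t3 ++ [v] then some (fT (t3 ++ [v]) w) else none := by
        intro w
        rw [PySem.Dict.get?_insert]
        by_cases hw : w = v
        · rw [if_pos hw, if_pos (by simp [hw]), hw]
          have : fT (t3 ++ [v]) v = ((t3.length : Nat) : Int) := by
            unfold fT
            rw [List.idxOf_append_of_notMem hv, List.idxOf_cons_self]
            simp
          rw [this]
        · rw [if_neg hw, hvm w]
          by_cases hwt : w ∈ t3
          · rw [if_pos hwt, if_pos (by simp [hwt])]
            unfold fT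
            rw [List.idxOf_append_of_mem hwt]
          · rw [if_neg hwt, if_neg (by simp [hwt, hw])]
      obtain ⟨ih1, ih2⟩ := ih _ _ _ hnd' hvm'
      have hdd : dd t3 (v :: l) = v :: dd (t3 ++ [v]) l := by simp [dd, hv]
      constructor
      · rw [List.foldl_cons, hb, ih1, hdd]
        simp
      · rw [List.foldl_cons, hb, ih2, hdd, List.map_cons]
        have hTeq : t3 ++ v :: dd (t3 ++ [v]) l = (t3 ++ [v]) ++ dd (t3 ++ [v]) l := by simp
        rw [hTeq]
        have hfv : fT ((t3 ++ [v]) ++ dd (t3 ++ [v]) l) v = ((t3.length : Nat) : Int) := by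
          unfold fT
          rw [List.idxOf_append_of_mem (by simp : v ∈ t3 ++ [v]),
            List.idxOf_append_of_notMem hv, List.idxOf_cons_self]
          simp
        rw [hfv]
        simp

-- ---------- A's block loop: from index loop with slices to a fold over chunks ----------
theorem slice_fold (s : Nat) (P : List Int)
    (g : (PySem.Dict (List Int) Int × List Int × List Int) → List Int →
         (PySem.Dict (List Int) Int × List Int × List Int)) :
    ∀ (m k : Nat) (R : List Int) st, P.drop (k * 2 ^ s) = R → R.length = m * 2 ^ s →
    (PySem.List.pyRange (k : Int) ((k + m : Nat) : Int) 1).foldl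
      (fun st b => g st (PySem.List.slice P (some (b * ((2 ^ s : Nat) : Int)))
        (some ((b + 1) * ((2 ^ s : Nat) : Int))))) st
    = (chunks s R).foldl g st := by
  intro m
  induction m with
  | zero =>
    intro k R st hdrop hlen
    have hR : R = [] := List.length_eq_zero_iff.mp (by simpa using hlen)
    subst hR
    rw [show ((k + 0 : Nat) : Int) = (k : Int) from by norm_num]
    rw [PySem.List.pyRange_one_eq_nil (le_refl _)]
    simp [chunks]
  | succ m ihm =>
    intro k R st hdrop hlen
    have hbs := Nat.two_pow_pos s
    have hRne : R ≠ [] := by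
      intro h
      rw [h] at hlen
      simp only [List.length_nil] at hlen
      have : 0 < (m + 1) * 2 ^ s := Nat.mul_pos (Nat.succ_pos m) hbs
      omega
    obtain ⟨r, rs, rfl⟩ := List.exists_cons_of_ne_nil hRne
    rw [PySem.List.pyRange_one_cons (by push_cast; omega), List.foldl_cons]
    have hms : (k + 1) * 2 ^ s - k * 2 ^ s = 2 ^ s := by rw [Nat.succ_mul]; omega
    have hslice : PySem.List.slice P (some ((k : Int) * ((2 ^ s : Nat) : Int)))
        (some (((k : Int) + 1) * ((2 ^ s : Nat) : Int))) = (r :: rs).take (2 ^ s) := by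
      have e1 : (k : Int) * ((2 ^ s : Nat) : Int) = ((k * 2 ^ s : Nat) : Int) := by
        push_cast; ring
      have e2 : ((k : Int) + 1) * ((2 ^ s : Nat) : Int) = (((k + 1) * 2 ^ s : Nat) : Int) := by
        push_cast; ring
      rw [e1, e2, PySem.List.slice_natCast, hdrop, hms]
    rw [hslice]
    rw [show chunks s (r :: rs) = (r :: rs).take (2 ^ s) :: chunks s ((r :: rs).drop (2 ^ s))
        from by rw [chunks]]
    rw [List.foldl_cons]
    have hdrop' : P.drop ((k + 1) * 2 ^ s) = (r :: rs).drop (2 ^ s) := by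
      rw [← hdrop, List.drop_drop]
      congr 1
      rw [Nat.succ_mul]
    have hlen' : ((r :: rs).drop (2 ^ s)).length = m * 2 ^ s := by
      rw [List.length_drop, hlen, Nat.succ_mul]
      omega
    have hrec := ihm (k + 1) ((r :: rs).drop (2 ^ s)) (g st ((r :: rs).take (2 ^ s))) hdrop' hlen'
    rw [show ((k : Int) + 1) = (((k + 1) : Nat) : Int) from by push_cast; try ring,
      show ((k + (m + 1) : Nat) : Int) = ((((k + 1) + m) : Nat) : Int) from by push_cast; try ring]
    exact hrec

-- t2_flat accumulates exactly the first-occurrence blocks, flattened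
theorem blocksA_t2f (s : Nat) :
    ∀ (cls : List (List Int)) (da : PySem.Dict (List Int) Int) (t2f t1a : List Int),
    (cls.foldl (bodyAc s) (da, t2f, t1a)).2.1 = t2f ++ (dd da.keys cls).flatten := by
  intro cls
  induction cls with
  | nil => intro da t2f t1a; simp [dd]
  | cons c cls ih =>
    intro da t2f t1a
    rw [List.foldl_cons]
    by_cases hc : da.contains c = true
    · have hb : bodyAc s (da, t2f, t1a) c = (da, t2f, t1a ++ [da.getD c 0]) := by
        unfold bodyAc
        rw [if_pos hc]
      rw [hb, ih]
      have hmem : c ∈ da.keys := (PySem.Dict.contains_iff_mem_keys da c).mp hc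
      rw [show dd da.keys (c :: cls) = dd da.keys cls from by simp [dd, hmem]]
    · have hcb : da.contains c = false := by simpa using hc
      have hnm : c ∉ da.keys := fun hm => by
        rw [(PySem.Dict.contains_iff_mem_keys da c).mpr hm] at hcb
        exact absurd hcb (by decide)
      have hb : bodyAc s (da, t2f, t1a) c =
          (da.insert c ((t2f.length >>> s : Nat) : Int), t2f ++ c,
           t1a ++ [((t2f.length >>> s : Nat) : Int)]) := by
        unfold bodyAc
        rw [if_neg hc]
        simp only []
        rw [PySem.Dict.getD_insert_self]
      rw [hb, ih]
      rw [PySem.Dict.keys_insert_of_not_contains da _ hcb]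
      rw [show dd da.keys (c :: cls) = c :: dd (da.keys ++ [c]) cls from by simp [dd, hnm]]
      simp [List.append_assoc]

-- ---------- the simultaneous block-loop correspondence ----------
theorem fT_inj (T : List Int) (v w : Int) (hv : v ∈ T) (h : fT T v = fT T w) : v = w := by
  unfold fT at h
  have h2 : T.idxOf v = T.idxOf w := by exact_mod_cast h
  exact (List.idxOf_inj hv).mp h2

theorem map_fT_inj (T : List Int) (c c' : List Int)
    (h1 : ∀ v ∈ c, v ∈ T) (he : c.map (fT T) = c'.map (fT T)) : c = c' := by
  induction c generalizing c' with
  | nil =>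
    cases c' with
    | nil => rfl
    | cons b c' => simp at he
  | cons a c ih =>
    cases c' with
    | nil => simp at he
    | cons b c' =>
      simp only [List.map_cons, List.cons.injEq] at he
      have ha : a ∈ T := h1 a List.mem_cons_self
      rw [fT_inj T a b ha he.1, ih c' (fun v hv => h1 v (List.mem_cons_of_mem _ hv)) he.2]

theorem blk_sim (s : Nat) (T : List Int) :
    ∀ (cls : List (List Int)) (da : PySem.Dict (List Int) Int) (t2f t1a : List Int)
      (db : PySem.Dict (List Int) Int) (t1b t2b : List Int),
    (∀ c ∈ cls, c.length = 2 ^ s ∧ ∀ v ∈ c, v ∈ T) →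
    (∀ c : List Int, (∀ v ∈ c, v ∈ T) → db.get? (c.map (fT T)) = da.get? c) →
    t1b = t1a → t2b = t2f.map (fT T) →
    t2f.length = 2 ^ s * da.size → da.size = db.size →
    (cls.foldl (bodyAc s) (da, t2f, t1a)).2.2
      = ((cls.map (List.map (fT T))).foldl bodyBc (db, t1b, t2b)).2.1 ∧
    ((cls.map (List.map (fT T))).foldl bodyBc (db, t1b, t2b)).2.2
      = ((cls.foldl (bodyAc s) (da, t2f, t1a)).2.1).map (fT T) := by
  intro cls
  induction cls with
  | nil =>
    intro da t2f t1a db t1b t2b hcls H2 I2 I3 I4 I5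
    simp only [List.map_nil, List.foldl_nil]
    exact ⟨I2.symm, I3⟩
  | cons c cls ih =>
    intro da t2f t1a db t1b t2b hcls H2 I2 I3 I4 I5
    obtain ⟨hclen, hcT⟩ := hcls c List.mem_cons_self
    have hkey := H2 c hcT
    rw [List.map_cons, List.foldl_cons, List.foldl_cons]
    cases hg : da.get? c with
    | some j =>
      have hcA : da.contains c = true := by rw [PySem.Dict.contains_eq_isSome_get?, hg]; rfl
      have hbA : bodyAc s (da, t2f, t1a) c = (da, t2f, t1a ++ [j]) := by
        unfold bodyAc
        rw [if_pos hcA]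
        simp only []
        rw [PySem.Dict.getD_of_get?_eq_some _ _ hg]
      have hbB : bodyBc (db, t1b, t2b) (c.map (fT T)) = (db, t1b ++ [j], t2b) := by
        unfold bodyBc
        rw [hkey, hg]
      rw [hbA, hbB]
      exact ih da t2f (t1a ++ [j]) db (t1b ++ [j]) t2b
        (fun c' hc' => hcls c' (List.mem_cons_of_mem _ hc')) H2 (by rw [I2]) I3 I4 I5
    | none =>
      have hcA : da.contains c = false := by rw [PySem.Dict.contains_eq_isSome_get?, hg]; rfl
      have hgB : db.get? (c.map (fT T)) = none := by rw [hkey, hg]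
      have hcB : db.contains (c.map (fT T)) = false := by
        rw [PySem.Dict.contains_eq_isSome_get?, hgB]; rfl
      have hidxA : ((t2f.length >>> s : Nat) : Int) = ((da.size : Nat) : Int) := by
        congr 1
        rw [Nat.shiftRight_eq_div_pow, I4, Nat.mul_div_cancel_left _ (Nat.two_pow_pos s)]
      have hbA : bodyAc s (da, t2f, t1a) c =
          (da.insert c ((da.size : Nat) : Int), t2f ++ c, t1a ++ [((da.size : Nat) : Int)]) := by
        unfold bodyAc
        rw [if_neg (by simp [hcA])]
        simp only []
        rw [PySem.Dict.getD_insert_self, hidxA]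
      have hbB : bodyBc (db, t1b, t2b) (c.map (fT T)) =
          (db.insert (c.map (fT T)) ((da.size : Nat) : Int),
           t1b ++ [((da.size : Nat) : Int)], t2b ++ c.map (fT T)) := by
        unfold bodyBc
        rw [hgB]
        simp only []
        rw [← I5]
      rw [hbA, hbB]
      apply ih
      · exact fun c' hc' => hcls c' (List.mem_cons_of_mem _ hc')
      · intro c' hc'T
        rw [PySem.Dict.get?_insert, PySem.Dict.get?_insert]
        by_cases hcc : c' = c
        · rw [if_pos hcc, if_pos (by rw [hcc])]
        · rw [if_neg hcc, if_neg (fun hmm => hcc (map_fT_inj T c' c hc'T hmm))]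
          exact H2 c' hc'T
      · rw [I2]
      · rw [I3, List.map_append]
      · rw [List.length_append, hclen, I4, PySem.Dict.size_insert, hcA]
        simp [Nat.mul_succ]
      · rw [PySem.Dict.size_insert, PySem.Dict.size_insert, hcA, hcB, I5]

-- B's while loop is a fold over the chunks
theorem altBlocks_eq_fold (s : Nat) : ∀ (rest : List Int)
    (st : PySem.Dict (List Int) Int × List Int × List Int),
    altBlocks s rest st = (chunks s rest).foldl bodyBc st := by
  intro rest st
  fun_induction altBlocks s rest st with
  | case1 st => simp [chunks]
  | case2 st v vs blk rest' st' ih =>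
    rw [show chunks s (v :: vs) =
        (v :: vs).take (2 ^ s) :: chunks s ((v :: vs).drop (2 ^ s)) from by rw [chunks]]
    rw [List.foldl_cons]
    exact ih

-- ---------- bridging the ports' inline lambdas to the named bodies ----------
theorem val_body_eq' :
    (fun (st : PySem.Dict Int Int × List Int × List Int) v =>
      match st.1.get? v with
      | some j => (st.1, st.2.1, st.2.2 ++ [j])
      | none => (st.1.insert v ((st.2.1.length : Nat) : Int), st.2.1 ++ [v],
          st.2.2 ++ [((st.2.1.length : Nat) : Int)])) = bodyV := rfl

theorem blockA_body_eq (s : Nat) (P : List Int) :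
    (fun (st : PySem.Dict (List Int) Int × List Int × List Int) (b : Int) =>
      let block := PySem.List.slice P (some (b * ((2 ^ s : Nat) : Int)))
        (some ((b + 1) * ((2 ^ s : Nat) : Int)))
      let st' := if st.1.contains block then st
                 else (st.1.insert block ((st.2.1.length >>> s : Nat) : Int), st.2.1 ++ block, st.2.2)
      (st'.1, st'.2.1, st'.2.2 ++ [st'.1.getD block 0])) =
    (fun st b => bodyAc s st (PySem.List.slice P (some (b * ((2 ^ s : Nat) : Int)))
      (some ((b + 1) * ((2 ^ s : Nat) : Int))))) := rfl

-- ===== VERDICT (by name: the statement is the Claim_ definition above) =====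
theorem splitbins_spec : Claim_equal_splitbins := by
  intro values shift _hdom hpre
  unfold Spec_splitbins
  have hneg : ¬ shift < 0 := not_lt.mpr hpre
  simp only [splitbins, splitbins_alt]
  rw [if_neg hneg, if_neg hneg]
  rw [val_body_eq, val_body_eq']
  rw [altBlocks_eq_fold]
  rw [pad_foldl_eq, pad_alt_eq shift.toNat values.length, ← padA_eq shift.toNat values]
  rw [blockA_body_eq shift.toNat (padA shift.toNat values)]
  set s := shift.toNat with hs
  set P := padA s values with hPdef
  have hbs := Nat.two_pow_pos s
  have hPlen : P.length = values.length + (2 ^ s - values.length % 2 ^ s) % 2 ^ s := by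
    rw [hPdef, padA_eq]
    simp
  have hdvd : 2 ^ s ∣ P.length := by
    rw [hPlen]
    have hdm := Nat.div_add_mod values.length (2 ^ s)
    have hmul : 2 ^ s * (values.length / 2 ^ s + 1)
        = 2 ^ s * (values.length / 2 ^ s) + 2 ^ s := Nat.mul_succ _ _
    have hlt : values.length % 2 ^ s < 2 ^ s := Nat.mod_lt _ hbs
    by_cases hr : values.length % 2 ^ s = 0
    · rw [hr, Nat.sub_zero, Nat.mod_self]
      exact ⟨values.length / 2 ^ s, by omega⟩
    · have he : (2 ^ s - values.length % 2 ^ s) % 2 ^ s = 2 ^ s - values.length % 2 ^ s :=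
        Nat.mod_eq_of_lt (by omega)
      rw [he]
      exact ⟨values.length / 2 ^ s + 1, by omega⟩
  have hfold1 := slice_fold s P (bodyAc s) (P.length / 2 ^ s) 0 P
    (PySem.Dict.empty, [], []) (by simp) ((Nat.div_mul_cancel hdvd).symm)
  simp only [Nat.zero_add, Nat.cast_zero] at hfold1
  rw [hfold1]
  have hv := val_loop P PySem.Dict.empty [] [] List.nodup_nil
    (by intro v; simp [PySem.Dict.get?_empty])
  obtain ⟨hv1, hv2⟩ := hv
  simp only [List.nil_append] at hv1 hv2
  have ht2f := blocksA_t2f s (chunks s P) PySem.Dict.empty [] []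
  simp only [PySem.Dict.keys_empty, List.nil_append] at ht2f
  have hddm := dd_main (chunks s P) [] [] (by simp)
  rw [flatten_chunks] at hddm
  have hvA := val_loop ((chunks s P).foldl (bodyAc s) (PySem.Dict.empty, [], [])).2.1
    PySem.Dict.empty [] [] List.nodup_nil (by intro v; simp [PySem.Dict.get?_empty])
  obtain ⟨hvA1, hvA2⟩ := hvA
  simp only [List.nil_append] at hvA1 hvA2
  have hTf : dd [] (((chunks s P).foldl (bodyAc s) (PySem.Dict.empty, [], [])).2.1) = dd [] P := by
    rw [ht2f]
    exact hddm
  have hcls : ∀ c ∈ chunks s P, c.length = 2 ^ s ∧ ∀ v ∈ c, v ∈ dd [] P := by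
    intro c hc
    exact ⟨chunks_length s P hdvd c hc,
      fun v hv => (mem_dd v P []).mpr ⟨mem_of_mem_chunks s P c hc v hv, by simp⟩⟩
  have hsim := blk_sim s (dd [] P) (chunks s P) PySem.Dict.empty [] []
    PySem.Dict.empty [] [] hcls (by intro c hc; simp [PySem.Dict.get?_empty]) rfl
    (by simp) (by simp [PySem.Dict.size_empty]) rfl
  obtain ⟨hs1, hs2⟩ := hsim
  rw [hv1, hv2, chunks_map s (fT (dd [] P)) P]
  simp only [Prod.mk.injEq]
  refine ⟨?_, ?_, ?_⟩
  · exact hs1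
  · rw [hvA2, hTf, hs2]
  · rw [hvA1, hTf]
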